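-- pv_equiv track=rewrite | github.com/Tedinat0r/EHTDRedux | TaskSorting.py | task_sort
-- ===== SOURCE A (Python) =====
-- def task_sort(dictionary):
--     sorted_items = []
--     priority_values = [1, 2]
--     dictionary = list(dictionary.items())
--     for number in priority_values:
--         sub_list = []
--         for item in dictionary:
--             if number == item[1][0]:
--                 sub_list.append(item)
--         if len(sub_list) > 0:
--             sorted_items.append(sub_list)
--     for item in sorted_items:
--         item = sorted(item, key= lambda x: x[1][1], reverse=True)
--     return(sorted_items)
-- ===== SOURCE B (Python) =====
-- def task_sort(dictionary):
--     # One pass over the items: route each into its priority group (1 or 2),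
--     # then return the non-empty groups in fixed order [1, 2].
--     group1 = []
--     group2 = []
--     for item in dictionary.items():
--         if item[1][0] == 1:
--             group1.append(item)
--         elif item[1][0] == 2:
--             group2.append(item)
--     return [g for g in (group1, group2) if g]
-- ===== Notes on version B (the rewrite author's own statement) =====
-- stated objective: simpler
-- what changed: A scans the item list once per priority value (two filtering passes) and carries a dead sort loop; B makes a single pass routing each item into one of two group accumulators and returns the non-empty groups in the fixed [1,2] order (the no-op sort loop is dropped).
import Mathlib
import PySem

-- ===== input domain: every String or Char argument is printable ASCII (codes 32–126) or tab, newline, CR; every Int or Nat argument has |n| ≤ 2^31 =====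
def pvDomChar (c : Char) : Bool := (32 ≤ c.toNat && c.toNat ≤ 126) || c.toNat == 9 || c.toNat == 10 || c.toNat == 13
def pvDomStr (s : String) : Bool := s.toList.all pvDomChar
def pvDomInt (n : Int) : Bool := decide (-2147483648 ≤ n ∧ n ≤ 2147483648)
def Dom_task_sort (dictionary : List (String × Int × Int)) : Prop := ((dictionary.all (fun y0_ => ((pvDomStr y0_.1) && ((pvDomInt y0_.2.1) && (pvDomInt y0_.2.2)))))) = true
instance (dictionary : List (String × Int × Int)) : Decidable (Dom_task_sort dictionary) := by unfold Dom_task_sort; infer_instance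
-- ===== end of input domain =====

-- ===== PORT A =====
-- A: two filtering passes over the items (one per priority value), collecting the
-- non-empty sublists; the final 'for item in sorted_items: item = sorted(...)' loop
-- only rebinds a local, so it is ported as a discarded computation.
def task_sort (dictionary : List (String × Int × Int)) : List (List (String × (Int × Int))) :=
  let priority_values : List Int := [1, 2]
  let items := (PySem.Dict.ofList dictionary).items
  let sorted_items :=
    priority_values.foldl (fun acc number =>
      let sub_list :=
        items.foldl (fun sl item => if number == item.2.1 then sl ++ [item] else sl) []
      if sub_list.length > 0 then acc ++ [sub_list] else acc) []
  let _ := sorted_items.foldl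
      (fun _ item => PySem.List.sorted item (fun x => x.2.2) true) []  -- dead loop: rebinds 'item' only
  sorted_items

-- ===== PORT B =====
-- B: a single pass routing each item into one of two group accumulators,
-- then the non-empty groups in fixed order [1, 2].
def task_sort_alt (dictionary : List (String × Int × Int)) : List (List (String × (Int × Int))) :=
  let p := ((PySem.Dict.ofList dictionary).items).foldl
      (fun (p : List (String × Int × Int) × List (String × Int × Int)) item =>
        if item.2.1 == 1 then (p.1 ++ [item], p.2)
        else if item.2.1 == 2 then (p.1, p.2 ++ [item])
        else p)
      ([], [])
  ([p.1, p.2].filter (fun g => !g.isEmpty))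

-- ===== PRECONDITION & SPEC =====
def Spec_task_sort (dictionary : List (String × Int × Int)) (out : List (List (String × (Int × Int)))) : Prop := out = task_sort_alt dictionary
instance (dictionary : List (String × Int × Int)) (out : List (List (String × (Int × Int)))) : Decidable (Spec_task_sort dictionary out) := by unfold Spec_task_sort; infer_instance

-- ===== CLAIM (what is proved, stated in full; the proofs are below) =====
def Claim_equal_task_sort : Prop := ∀ (dictionary : List (String × Int × Int)), Dom_task_sort dictionary → Spec_task_sort dictionary (task_sort dictionary)

-- ===== LEMMAS AND PROOFS =====

-- B's pair-accumulator pass computes the two filters A's two passes compute.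
theorem pair_foldl_filters (l : List (String × Int × Int))
    (a b : List (String × Int × Int)) :
    l.foldl
      (fun (p : List (String × Int × Int) × List (String × Int × Int)) item =>
        if item.2.1 == 1 then (p.1 ++ [item], p.2)
        else if item.2.1 == 2 then (p.1, p.2 ++ [item])
        else p)
      (a, b)
    = (a ++ l.filter (fun it => it.2.1 == 1), b ++ l.filter (fun it => it.2.1 == 2)) := by
  induction l generalizing a b with
  | nil => simp
  | cons x xs ih =>
    simp only [List.foldl_cons]
    by_cases h1 : x.2.1 = 1
    · rw [if_pos (by simp [h1]), ih]
      simp [h1]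
    · by_cases h2 : x.2.1 = 2
      · rw [if_neg (by simp [h1]), if_pos (by simp [h2]), ih]
        simp [h2]
      · rw [if_neg (by simp [h1]), if_neg (by simp [h2]), ih]
        simp [h1, h2]

-- ===== VERDICT (by name: the statement is the Claim_ definition above) =====
theorem task_sort_spec : Claim_equal_task_sort := by
  intro d _
  unfold Spec_task_sort task_sort task_sort_alt
  rw [pair_foldl_filters]
  simp only [List.foldl_cons, List.foldl_nil,
    PySem.List.foldl_append_if_eq_filter, List.nil_append]
  have hcongr : ∀ (n : Int) (l : List (String × Int × Int)),
      l.filter (fun it => n == it.2.1) = l.filter (fun it => it.2.1 == n) := by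
    intro n l
    apply List.filter_congr
    intro x _
    simp [BEq.comm]
  rw [hcongr 1, hcongr 2]
  set f1 := ((PySem.Dict.ofList d).items).filter (fun it => it.2.1 == 1) with hf1
  set f2 := ((PySem.Dict.ofList d).items).filter (fun it => it.2.1 == 2) with hf2
  by_cases h1 : f1 = [] <;> by_cases h2 : f2 = [] <;>
    simp [h1, h2, List.length_pos_iff]
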